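-- pv_equiv track=rewrite | github.com/kcoms555/coding-test | programmers/64062_2019-kakao-internship_overcome-stepping-stones.py | can_they_go
-- ===== SOURCE A (Python) =====
-- def can_they_go(number_of_people, stones, k):
--     count = 0
--     for stone in stones:
--         if stone - (number_of_people - 1) > 0:
--             count = 0
--             continue
--         count += 1
--         if count >= k:
--             return False
--     return True
-- ===== SOURCE B (Python) =====
-- def can_they_go(number_of_people, stones, k):
--     bits = ''.join('x' if stone <= number_of_people - 1 else '.' for stone in stones)
--     runs = bits.split('.')
--     return all(len(run) < k for run in runs if run)
-- ===== Notes on version B (the rewrite author's own statement) =====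
-- stated objective: alternative
-- what changed: Replaces the live reset-counter scan with early exit by a two-phase run-length method: encode each stone as a blocked/free character, split the string on the free marker into maximal blocked runs, and check every run length is below k.
import Mathlib
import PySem

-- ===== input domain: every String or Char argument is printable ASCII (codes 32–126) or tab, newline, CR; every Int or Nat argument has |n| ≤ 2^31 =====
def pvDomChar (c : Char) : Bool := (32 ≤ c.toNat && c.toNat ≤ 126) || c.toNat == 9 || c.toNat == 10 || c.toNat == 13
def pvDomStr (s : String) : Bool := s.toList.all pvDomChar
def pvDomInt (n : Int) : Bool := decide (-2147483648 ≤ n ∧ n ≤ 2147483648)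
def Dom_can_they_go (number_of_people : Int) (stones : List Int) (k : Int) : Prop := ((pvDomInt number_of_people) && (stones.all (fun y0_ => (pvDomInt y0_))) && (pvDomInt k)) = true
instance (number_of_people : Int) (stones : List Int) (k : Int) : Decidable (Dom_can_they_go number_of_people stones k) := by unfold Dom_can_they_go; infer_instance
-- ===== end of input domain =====

-- B replaces A's live reset-counter scan by encoding stones as blocked/free characters,
-- splitting on the free marker into maximal blocked runs, and checking all run lengths < k (objective: alternative).

-- ===== PORT A =====
-- the for-loop over stones with the mutable counter and early 'return False'
def canGoA (n k : Int) : List Int → Int → Bool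
  | [], _ => true
  | stone :: rest, count =>
    if stone - (n - 1) > 0 then canGoA n k rest 0
    else if count + 1 ≥ k then false
    else canGoA n k rest (count + 1)

def can_they_go (number_of_people : Int) (stones : List Int) (k : Int) : Bool :=
  canGoA number_of_people k stones 0

-- ===== PORT B =====
def can_they_go_alt (number_of_people : Int) (stones : List Int) (k : Int) : Bool :=
  let bits : String :=
    PySem.Str.join "" (stones.map (fun stone => if stone ≤ number_of_people - 1 then "x" else "."))
  let runs : List String := (PySem.Str.split? bits ".").getD []
  (runs.filter (fun run => run ≠ "")).all (fun run => decide (PySem.Str.len run < k))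

-- ===== PRECONDITION & SPEC =====
def Spec_can_they_go (number_of_people : Int) (stones : List Int) (k : Int) (out : Bool) : Prop := out = can_they_go_alt number_of_people stones k
instance (number_of_people : Int) (stones : List Int) (k : Int) (out : Bool) : Decidable (Spec_can_they_go number_of_people stones k out) := by unfold Spec_can_they_go; infer_instance

-- ===== CLAIM (what is proved, stated in full; the proofs are below) =====
def Claim_equal_can_they_go : Prop := ∀ (number_of_people : Int) (stones : List Int) (k : Int), Dom_can_they_go number_of_people stones k → Spec_can_they_go number_of_people stones k (can_they_go number_of_people stones k)

-- ===== LEMMAS AND PROOFS =====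

-- reference form of splitting a char list on a single separator character
def runsplit (c : Char) : List Char → List (List Char)
  | [] => [[]]
  | a :: t =>
    if a = c then [] :: runsplit c t
    else
      match runsplit c t with
      | h :: tl => (a :: h) :: tl
      | [] => [[a]]

theorem runsplit_ne_nil (c : Char) (l : List Char) : runsplit c l ≠ [] := by
  cases l with
  | nil => simp [runsplit]
  | cons a t =>
    simp only [runsplit]
    split
    · simp
    · split <;> simp

theorem splitOn_go_eq (c : Char) :
    ∀ (fuel : Nat) (l cur : List Char) (acc : List (List Char)), l.length ≤ fuel →
      PySem.Chars.splitOn.go [c] fuel l cur acc =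
        acc.reverse ++ (cur.reverse ++ (runsplit c l).headI) :: (runsplit c l).tail := by
  intro fuel
  induction fuel with
  | zero =>
    intro l cur acc h
    have : l = [] := by cases l <;> simp_all
    subst this
    simp [PySem.Chars.splitOn.go, runsplit]
  | succ m ih =>
    intro l cur acc h
    cases l with
    | nil => simp [PySem.Chars.splitOn.go, runsplit]
    | cons a t =>
      rw [PySem.Chars.splitOn.go]
      by_cases hac : a = c
      · subst hac
        have hpre : List.isPrefixOf [a] (a :: t) = true := by simp [List.isPrefixOf]
        rw [if_pos hpre]
        simp only [List.length, List.drop_succ_cons, List.drop_zero] at *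
        rw [ih t [] (cur.reverse :: acc) (by omega)]
        obtain ⟨h1, tl, hrs⟩ := List.exists_cons_of_ne_nil (runsplit_ne_nil a t)
        simp [runsplit, hrs]
      · have hpre : List.isPrefixOf [c] (a :: t) = false := by
          simp [List.isPrefixOf]
          exact fun hca => absurd hca.symm hac
        rw [if_neg (by simp [hpre])]
        simp only [List.length] at h
        rw [ih t (a :: cur) acc (by omega)]
        obtain ⟨h1, tl, hrs⟩ := List.exists_cons_of_ne_nil (runsplit_ne_nil c t)
        simp [runsplit, hac, hrs]

theorem splitOn_single (c : Char) (l : List Char) :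
    PySem.Chars.splitOn l [c] = runsplit c l := by
  obtain ⟨h1, tl, hrs⟩ := List.exists_cons_of_ne_nil (runsplit_ne_nil c l)
  unfold PySem.Chars.splitOn
  rw [splitOn_go_eq c (l.length + 1) l [] [] (by omega)]
  simp [hrs]

-- the pass/fail shape the counter loop computes, expressed on the run decomposition
def goB (k count : Int) (rs : List (List Char)) : Bool :=
  match rs with
  | [] => true
  | h :: t =>
    decide (h = [] ∨ count + (h.length : Int) < k) &&
      (t.filter (· ≠ [])).all (fun r => decide ((r.length : Int) < k))

theorem goB_zero (k : Int) (l : List Char) (c : Char) :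
    goB k 0 (runsplit c l) =
      ((runsplit c l).filter (· ≠ [])).all (fun r => decide ((r.length : Int) < k)) := by
  obtain ⟨h1, tl, hrs⟩ := List.exists_cons_of_ne_nil (runsplit_ne_nil c l)
  rw [hrs]
  by_cases h1e : h1 = []
  · simp [goB, h1e]
  · simp [goB, h1e]

theorem canGoA_eq_goB (n k : Int) (f : Int → Char)
    (hf : ∀ s, f s = if s ≤ n - 1 then 'x' else '.')
    (stones : List Int) (count : Int) (h0 : 0 ≤ count) :
    canGoA n k stones count = goB k count (runsplit '.' (stones.map f)) := by
  induction stones generalizing count with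
  | nil => simp [canGoA, runsplit, goB]
  | cons stone rest ih =>
    have hA : canGoA n k (stone :: rest) count =
        if stone - (n - 1) > 0 then canGoA n k rest 0
        else if count + 1 ≥ k then false
        else canGoA n k rest (count + 1) := rfl
    rw [hA, List.map_cons]
    by_cases hb : stone ≤ n - 1
    · -- blocked stone: encoded as 'x'
      have hfs : f stone = 'x' := by rw [hf stone, if_pos hb]
      obtain ⟨h1, tl, hrs⟩ := List.exists_cons_of_ne_nil (runsplit_ne_nil '.' (rest.map f))
      have hrun : runsplit '.' (f stone :: rest.map f) = (f stone :: h1) :: tl := by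
        simp only [runsplit]
        rw [if_neg (by rw [hfs]; decide), hrs]
      rw [hrun, if_neg (by omega)]
      by_cases hk : count + 1 ≥ k
      · have hfalse : ¬ ((f stone :: h1) = [] ∨ count + ((f stone :: h1).length : Int) < k) := by
          push Not
          refine ⟨by simp, ?_⟩
          have hlen : (0 : Int) ≤ (h1.length : Int) := by positivity
          simp only [List.length_cons]
          push_cast
          omega
        rw [if_pos hk]
        simp only [goB]
        rw [decide_eq_false hfalse, Bool.false_and]
      · rw [if_neg hk, ih (count + 1) (by omega), hrs]
        simp only [goB, List.length_cons]
        congr 1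
        rw [decide_eq_decide]
        constructor
        · rintro (h | h)
          · subst h
            right
            simp only [List.length_nil]
            push_cast
            omega
          · right; push_cast at h ⊢; omega
        · rintro (h | h)
          · exact absurd h (by simp)
          · right; push_cast at h ⊢; omega
    · -- free stone: encoded as '.', counter resets
      have hfs : f stone = '.' := by rw [hf stone, if_neg hb]
      have hrun : runsplit '.' (f stone :: rest.map f) = [] :: runsplit '.' (rest.map f) := by
        simp only [runsplit]
        rw [if_pos hfs]
      rw [hrun, if_pos (by omega), ih 0 le_rfl, goB_zero]
      simp [goB]

theorem intersperse_nil_flatten (xss : List (List Char)) :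
    (List.intersperse ([] : List Char) xss).flatten = xss.flatten := by
  induction xss with
  | nil => rfl
  | cons h t ih => cases t <;> simp_all

theorem flatten_map_singleton (l : List Int) (f : Int → Char) :
    (l.map (fun x => [f x])).flatten = l.map f := by
  induction l with
  | nil => rfl
  | cons h t ih => simp_all

theorem alt_eq (n : Int) (stones : List Int) (k : Int) :
    can_they_go_alt n stones k =
      ((runsplit '.' (stones.map (fun s => if s ≤ n - 1 then 'x' else '.'))).filter
          (· ≠ [])).all (fun r => decide ((r.length : Int) < k)) := by
  unfold can_they_go_alt
  have hbits : (PySem.Str.join ""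
      (stones.map (fun stone => if stone ≤ n - 1 then "x" else "."))).toList =
      stones.map (fun s => if s ≤ n - 1 then 'x' else '.') := by
    rw [PySem.Str.toList_join]
    have hmm : (stones.map (fun stone => if stone ≤ n - 1 then "x" else ".")).map String.toList =
        stones.map (fun s => [if s ≤ n - 1 then 'x' else '.']) := by
      rw [List.map_map]
      apply List.map_congr_left
      intro s _
      by_cases h : s ≤ n - 1
      · rw [if_pos h]; simp only [Function.comp_apply, if_pos h]; rfl
      · rw [if_neg h]; simp only [Function.comp_apply, if_neg h]; rfl
    rw [hmm]
    show List.intercalate [] _ = _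
    rw [List.intercalate, intersperse_nil_flatten]
    have := flatten_map_singleton stones (fun s => if s ≤ n - 1 then 'x' else '.')
    simpa using this
  simp only [PySem.Str.split?, PySem.Chars.split?]
  rw [if_neg (by decide : ¬ ((("." : String).toList.isEmpty) = true))]
  rw [show (("." : String).toList) = ['.'] from rfl, hbits, splitOn_single]
  simp only [Option.map_some, Option.getD_some]
  rw [List.filter_map, List.all_map]
  simp [PySem.Str.len_eq]

-- ===== VERDICT (by name: the statement is the Claim_ definition above) =====
theorem can_they_go_spec : Claim_equal_can_they_go := by
  intro n stones k _
  unfold Spec_can_they_go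
  rw [alt_eq]
  unfold can_they_go
  rw [canGoA_eq_goB n k (fun s => if s ≤ n - 1 then 'x' else '.') (fun _ => rfl) stones 0 le_rfl, goB_zero]
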